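-- pv_equiv track=rewrite | github.com/patFish/adventofcode19 | day01p2.py | liftOffFuel
-- ===== SOURCE A (Python) =====
-- def fuel(mass: int) -> int:
--     return mass//3 - 2
--
-- def liftOffFuel(mass: int) -> int:
--   fuels = []
--   res = (fuel(mass))
--   fuels.append(res)
--   while(fuel(res) > 0):
--     res = fuel(res)
--     fuels.append(res)
--   return sum(fuels)
-- ===== SOURCE B (Python) =====
-- def fuel(mass: int) -> int:
--     return mass//3 - 2
--
-- def liftOffFuel(mass: int) -> int:
--     f = fuel(mass)
--     if fuel(f) <= 0:
--         return f
--     return f + liftOffFuel(f)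
-- ===== Notes on version B (the rewrite author's own statement) =====
-- stated objective: simpler
-- what changed: Replaced the accumulating while-loop that builds a list of fuel terms and sums it with a direct self-recursion on the fuel recurrence (base case returns the first fuel term unconditionally, matching A on negative/small masses).
import Mathlib
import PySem

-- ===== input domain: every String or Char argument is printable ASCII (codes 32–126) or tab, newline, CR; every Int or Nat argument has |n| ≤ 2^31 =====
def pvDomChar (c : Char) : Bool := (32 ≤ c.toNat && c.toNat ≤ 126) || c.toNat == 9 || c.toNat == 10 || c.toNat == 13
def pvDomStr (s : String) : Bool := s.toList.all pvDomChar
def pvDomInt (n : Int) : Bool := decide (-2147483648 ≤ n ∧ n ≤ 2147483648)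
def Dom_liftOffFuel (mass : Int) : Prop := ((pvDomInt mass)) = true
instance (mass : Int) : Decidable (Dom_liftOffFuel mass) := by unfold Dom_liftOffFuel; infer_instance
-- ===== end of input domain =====

-- ===== PORT A =====
-- B replaces A's list-accumulating while-loop with direct recursion on the fuel recurrence (objective: simpler).
def fuelA (mass : Int) : Int := PySem.Int.floordiv mass 3 - 2

-- termination lemmas used by both ports' recursion
theorem fuelA_toNat_lt (r : Int) (h : 0 < fuelA r) : (fuelA r).toNat < r.toNat := by
  unfold fuelA at *
  have h3 : (0:Int) < 3 := by omega
  simp only [PySem.Int.floordiv_eq_ediv_of_pos h3] at *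
  omega

theorem fuelA_pos_of_pos (r : Int) (h : 0 < fuelA (fuelA r)) : 0 < fuelA r := by
  unfold fuelA at h ⊢
  have h3 : (0:Int) < 3 := by omega
  simp only [PySem.Int.floordiv_eq_ediv_of_pos h3] at *
  omega

def liftOffLoop (res : Int) (fuels : List Int) : Int :=
  if 0 < fuelA res then liftOffLoop (fuelA res) (fuels ++ [fuelA res]) else fuels.sum
termination_by res.toNat
decreasing_by exact fuelA_toNat_lt res (by assumption)

def liftOffFuel (mass : Int) : Int := liftOffLoop (fuelA mass) [fuelA mass]

-- ===== PORT B =====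
def liftOffFuel_alt (mass : Int) : Int :=
  let f := fuelA mass
  if fuelA f ≤ 0 then f else f + liftOffFuel_alt f
termination_by mass.toNat
decreasing_by
  rename_i h
  exact fuelA_toNat_lt mass (fuelA_pos_of_pos mass (not_le.mp h))

-- ===== PRECONDITION & SPEC =====
def Spec_liftOffFuel (mass : Int) (out : Int) : Prop := out = liftOffFuel_alt mass
instance (mass : Int) (out : Int) : Decidable (Spec_liftOffFuel mass out) := by unfold Spec_liftOffFuel; infer_instance

-- ===== CLAIM (what is proved, stated in full; the proofs are below) =====
def Claim_equal_liftOffFuel : Prop := ∀ (mass : Int), Dom_liftOffFuel mass → Spec_liftOffFuel mass (liftOffFuel mass)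

-- ===== LEMMAS AND PROOFS =====
theorem loop_pos (r : Int) (L : List Int) (h : 0 < fuelA r) :
    liftOffLoop r L = liftOffLoop (fuelA r) (L ++ [fuelA r]) := by
  rw [liftOffLoop]; simp [h]

theorem loop_neg (r : Int) (L : List Int) (h : ¬ 0 < fuelA r) :
    liftOffLoop r L = L.sum := by
  rw [liftOffLoop]; simp [h]

theorem liftOffLoop_shift (n : Nat) : ∀ (r : Int), r.toNat ≤ n → ∀ (L : List Int),
    liftOffLoop r L = L.sum + liftOffLoop r [] := by
  induction n with
  | zero =>
    intro r hr L
    by_cases h : 0 < fuelA r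
    · exact absurd (fuelA_toNat_lt r h) (by omega)
    · rw [loop_neg r L h, loop_neg r [] h]; simp
  | succ n ih =>
    intro r hr L
    by_cases h : 0 < fuelA r
    · have hlt := fuelA_toNat_lt r h
      rw [loop_pos r L h, loop_pos r [] h,
        ih (fuelA r) (by omega) (L ++ [fuelA r]), ih (fuelA r) (by omega) ([] ++ [fuelA r])]
      simp; ring
    · rw [loop_neg r L h, loop_neg r [] h]; simp

theorem alt_eq_loop (n : Nat) : ∀ (r : Int), r.toNat ≤ n →
    liftOffFuel_alt r = fuelA r + liftOffLoop (fuelA r) [] := by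
  induction n with
  | zero =>
    intro r hr
    rw [liftOffFuel_alt]
    by_cases h : 0 < fuelA (fuelA r)
    · exact absurd (fuelA_toNat_lt r (fuelA_pos_of_pos r h)) (by omega)
    · rw [loop_neg (fuelA r) [] h]
      simp [show fuelA (fuelA r) ≤ 0 by omega]
  | succ n ih =>
    intro r hr
    rw [liftOffFuel_alt]
    by_cases h : 0 < fuelA (fuelA r)
    · have h1 := fuelA_pos_of_pos r h
      have hlt := fuelA_toNat_lt r h1
      have hlt2 := fuelA_toNat_lt (fuelA r) h
      simp only [show ¬ fuelA (fuelA r) ≤ 0 by omega, if_neg, not_false_eq_true]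
      rw [ih (fuelA r) (by omega),
        loop_pos (fuelA r) [] h,
        liftOffLoop_shift n (fuelA (fuelA r)) (by omega) ([] ++ [fuelA (fuelA r)])]
      simp
    · rw [loop_neg (fuelA r) [] h]
      simp [show fuelA (fuelA r) ≤ 0 by omega]

-- ===== VERDICT (by name: the statement is the Claim_ definition above) =====
theorem liftOffFuel_spec : Claim_equal_liftOffFuel := by
  intro mass _
  unfold Spec_liftOffFuel liftOffFuel
  have hb : (fuelA mass).toNat ≤ mass.toNat := by
    by_cases h : 0 < fuelA mass
    · exact le_of_lt (fuelA_toNat_lt mass h)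
    · have : (fuelA mass).toNat = 0 := Int.toNat_of_nonpos (by omega)
      omega
  rw [liftOffLoop_shift mass.toNat (fuelA mass) hb [fuelA mass],
      alt_eq_loop mass.toNat mass le_rfl]
  simp
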